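-- pv_equiv track=rewrite | github.com/XiaoYuan011/CasCIFF | preprocess/preprocess_graph_signal_time.py | get_nodes
-- ===== SOURCE A (Python) =====
-- def get_nodes(graph):
--     nodes = {}
--     j = 0
--     for walk in graph:
--         for i in walk[0]:
--             if i not in nodes.keys():
--                 nodes[i] = j
--                 j = j + 1
--     return nodes
-- ===== SOURCE B (Python) =====
-- def get_nodes(graph):
--     flat = []
--     for walk in graph:
--         flat.extend(walk[0])
--     uniques = dict.fromkeys(flat)
--     return {node: i for i, node in enumerate(uniques)}
-- ===== Notes on version B (the rewrite author's own statement) =====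
-- stated objective: idiomatic
-- what changed: Replaced A's single interleaved pass maintaining a dict and a running counter with a three-phase collect-flatten, dict.fromkeys dedup (first-occurrence order), then enumerate to assign indices.
import Mathlib
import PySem

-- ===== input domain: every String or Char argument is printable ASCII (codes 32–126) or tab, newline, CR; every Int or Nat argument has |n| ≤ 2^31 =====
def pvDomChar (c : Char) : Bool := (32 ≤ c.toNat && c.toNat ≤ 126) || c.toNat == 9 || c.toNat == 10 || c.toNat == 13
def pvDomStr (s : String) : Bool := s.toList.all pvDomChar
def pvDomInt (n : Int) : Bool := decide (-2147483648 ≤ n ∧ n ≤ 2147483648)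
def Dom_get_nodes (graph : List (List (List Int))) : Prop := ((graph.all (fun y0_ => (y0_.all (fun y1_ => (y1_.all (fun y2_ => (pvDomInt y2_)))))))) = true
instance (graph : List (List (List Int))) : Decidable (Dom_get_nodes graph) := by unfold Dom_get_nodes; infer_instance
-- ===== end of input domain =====

-- B collects every walk[0] into one flat list, dedups it with dict.fromkeys (first occurrences),
-- and enumerates the result — a collect→dedupe→index decomposition instead of A's interleaved
-- counter-and-membership pass (objective: idiomatic).

-- ===== PORT A =====
-- walk[0] is total here via getD []; Pre_get_nodes guarantees every walk is nonempty, so it is exact.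
def get_nodes (graph : List (List (List Int))) : List (Int × Int) :=
  (graph.foldl
    (fun (st : PySem.Dict Int Int × Int) walk =>
      ((PySem.List.pyGet? walk 0).getD []).foldl
        (fun st i => if st.1.contains i then st else (st.1.insert i st.2, st.2 + 1)) st)
    (PySem.Dict.empty, 0)).1.items

-- ===== PORT B =====
def get_nodes_alt (graph : List (List (List Int))) : List (Int × Int) :=
  let flat := graph.foldl (fun acc walk => acc ++ (PySem.List.pyGet? walk 0).getD []) []
  let uniques := PySem.List.dedup flat
  (PySem.List.enumerate uniques 0).map (fun p => (p.2, p.1))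

-- ===== PRECONDITION & SPEC =====
-- Pre_ excludes graphs containing an empty walk, on which A's walk[0] raises IndexError.
def Pre_get_nodes (graph : List (List (List Int))) : Prop :=
  ∀ walk ∈ graph, walk ≠ []
instance (graph : List (List (List Int))) : Decidable (Pre_get_nodes graph) := by
  unfold Pre_get_nodes; infer_instance

def pvWitness_get_nodes : List (List (List Int)) := [[[1, 2], [9]], [[2, 3]]]

def Spec_get_nodes (graph : List (List (List Int))) (out : List (Int × Int)) : Prop := out = get_nodes_alt graph
instance (graph : List (List (List Int))) (out : List (Int × Int)) : Decidable (Spec_get_nodes graph out) := by unfold Spec_get_nodes; infer_instance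

-- ===== CLAIM (what is proved, stated in full; the proofs are below) =====
def Claim_equal_get_nodes : Prop := ∀ (graph : List (List (List Int))), Dom_get_nodes graph → Pre_get_nodes graph → Spec_get_nodes graph (get_nodes graph)

-- ===== LEMMAS AND PROOFS =====

/-- The dictionary whose items enumerate the distinct node list `s` in order. -/
def mkD (s : List Int) : PySem.Dict Int Int :=
  PySem.Dict.mk ((PySem.List.enumerate s 0).map (fun p => (p.2, p.1)))

def stepA (st : PySem.Dict Int Int × Int) (i : Int) : PySem.Dict Int Int × Int :=
  if st.1.contains i then st else (st.1.insert i st.2, st.2 + 1)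

lemma keys_mkD (s : List Int) : (mkD s).keys = s := by
  show ((PySem.List.enumerate s 0).map (fun p => (p.2, p.1))).map (·.1) = s
  rw [List.map_map]
  exact PySem.List.map_snd_enumerate s 0

lemma contains_mkD (s : List Int) (i : Int) :
    (mkD s).contains i = decide (i ∈ s) := by
  rw [PySem.Dict.contains_eq_decide_mem_keys, keys_mkD]

lemma mkD_snoc (s : List Int) (i : Int) (h : i ∉ s) :
    (mkD s).insert i (s.length : Int) = mkD (s ++ [i]) := by
  apply PySem.Dict.ext
  have hc : (mkD s).contains i = false := by rw [contains_mkD]; simp [h]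
  simp only [PySem.Dict.items_insert, hc, Bool.false_eq_true, if_false]
  show ((PySem.List.enumerate s 0).map (fun p => (p.2, p.1))) ++ [(i, (s.length : Int))]
      = (PySem.List.enumerate (s ++ [i]) 0).map (fun p => (p.2, p.1))
  rw [PySem.List.enumerate_append]
  simp [PySem.List.enumerate_cons, PySem.List.enumerate_nil]

lemma foldl_stepA (l s : List Int) (h : s.Nodup) :
    l.foldl stepA (mkD s, (s.length : Int))
      = (mkD (l.foldl PySem.Set.add s), ((l.foldl PySem.Set.add s).length : Int)) := by
  induction l generalizing s with
  | nil => rfl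
  | cons i l ih =>
    by_cases hi : i ∈ s
    · have hs : PySem.Set.add s i = s := by simp [PySem.Set.add, PySem.Set.contains, hi]
      have : stepA (mkD s, (s.length : Int)) i = (mkD s, (s.length : Int)) := by
        simp [stepA, contains_mkD, hi]
      simp only [List.foldl_cons, this, hs]
      exact ih s h
    · have hs : PySem.Set.add s i = s ++ [i] := by
        simp [PySem.Set.add, PySem.Set.contains, hi]
      have : stepA (mkD s, (s.length : Int)) i
          = (mkD (s ++ [i]), ((s ++ [i]).length : Int)) := by
        simp only [stepA, contains_mkD, hi, decide_false, Bool.false_eq_true, if_false]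
        rw [mkD_snoc s i hi]
        simp
      simp only [List.foldl_cons, this, hs]
      exact ih (s ++ [i]) (by
        rw [List.nodup_append]
        refine ⟨h, List.nodup_singleton i, ?_⟩
        intro a ha b hb
        rw [List.mem_singleton] at hb
        subst hb
        exact fun e => hi (e ▸ ha))

/-- A's nested loop is the flat loop over the concatenation of all first walks. -/
lemma foldl_nested (graph : List (List (List Int))) (st : PySem.Dict Int Int × Int) :
    graph.foldl
      (fun st walk => ((PySem.List.pyGet? walk 0).getD []).foldl stepA st) st
    = (graph.flatMap (fun walk => (PySem.List.pyGet? walk 0).getD [])).foldl stepA st := by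
  induction graph generalizing st with
  | nil => rfl
  | cons w g ih => simp only [List.foldl_cons, List.flatMap_cons, List.foldl_append, ih]

lemma foldl_acc_append (graph : List (List (List Int))) (acc : List Int) :
    graph.foldl (fun acc walk => acc ++ (PySem.List.pyGet? walk 0).getD []) acc
    = acc ++ graph.flatMap (fun walk => (PySem.List.pyGet? walk 0).getD []) := by
  induction graph generalizing acc with
  | nil => simp
  | cons w g ih => simp [ih, List.append_assoc]

-- ===== VERDICT (by name: the statement is the Claim_ definition above) =====
theorem get_nodes_spec : Claim_equal_get_nodes := by
  intro graph _ _
  show get_nodes graph = get_nodes_alt graph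
  unfold get_nodes
  dsimp only [get_nodes_alt]
  rw [show (fun (st : PySem.Dict Int Int × Int) walk =>
      ((PySem.List.pyGet? walk 0).getD []).foldl
        (fun st i => if st.1.contains i then st else (st.1.insert i st.2, st.2 + 1)) st)
    = (fun st walk => ((PySem.List.pyGet? walk 0).getD []).foldl stepA st) from rfl]
  rw [foldl_nested, foldl_acc_append]
  rw [show (PySem.Dict.empty, (0 : Int)) = (mkD [], ((List.length ([] : List Int)) : Int)) from rfl]
  rw [foldl_stepA _ [] List.nodup_nil]
  rw [PySem.List.dedup_eq_ofList, PySem.Set.ofList_eq_foldl]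
  rfl
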